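-- pv_equiv track=rewrite | github.com/merlinepedra/DeepPavlov | deeppavlov/dataset_readers/punctuation_dataset_reader.py | combine_punctuation_sents
-- ===== SOURCE A (Python) =====
-- from string import punctuation
--
-- PUNCTUATION = punctuation + "«»"
--
-- NO_PUNCT = "NONE"
--
-- def combine_punctuation_sents(source_words, target_words, target_labels):
--     target_index, answer = 0, []
--     # while source_index < len(source_words) and target_index < len(target_words):
--     for source_index, source_word in enumerate(source_words):
--         if all(x in PUNCTUATION for x in source_word):
--             answer.append(NO_PUNCT)
--             continue
--         if target_index >= len(target_words):
--             return None
--         target_word = target_words[target_index]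
--         if source_word != target_word:
--             return None
--         answer.append(target_labels[target_index])
--         target_index += 1
--     if target_index < len(target_words):
--         return None
--     return answer
-- ===== SOURCE B (Python) =====
-- from string import punctuation
--
-- PUNCTUATION = punctuation + "\u00ab\u00bb"
--
-- NO_PUNCT = "NONE"
--
-- def combine_punctuation_sents(source_words, target_words, target_labels):
--     # pass 1: the non-punctuation source words must equal target_words elementwise
--     reals = [w for w in source_words if not all(x in PUNCTUATION for x in w)]
--     if len(reals) != len(target_words):
--         return None
--     for r, t in zip(reals, target_words):
--         if r != t:
--             return None
--     # pass 2: emit NO_PUNCT for punctuation tokens, the next label otherwise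
--     answer = []
--     k = 0
--     for w in source_words:
--         if all(x in PUNCTUATION for x in w):
--             answer.append(NO_PUNCT)
--         else:
--             answer.append(target_labels[k])
--             k += 1
--     return answer
-- ===== Notes on version B (the rewrite author's own statement) =====
-- stated objective: alternative
-- what changed: B splits A's single interleaved loop with a running target cursor into two passes: first validate that the non-punctuation source words equal target_words, then build the label sequence; same O(n) cost, different decomposition.
import Mathlib
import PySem

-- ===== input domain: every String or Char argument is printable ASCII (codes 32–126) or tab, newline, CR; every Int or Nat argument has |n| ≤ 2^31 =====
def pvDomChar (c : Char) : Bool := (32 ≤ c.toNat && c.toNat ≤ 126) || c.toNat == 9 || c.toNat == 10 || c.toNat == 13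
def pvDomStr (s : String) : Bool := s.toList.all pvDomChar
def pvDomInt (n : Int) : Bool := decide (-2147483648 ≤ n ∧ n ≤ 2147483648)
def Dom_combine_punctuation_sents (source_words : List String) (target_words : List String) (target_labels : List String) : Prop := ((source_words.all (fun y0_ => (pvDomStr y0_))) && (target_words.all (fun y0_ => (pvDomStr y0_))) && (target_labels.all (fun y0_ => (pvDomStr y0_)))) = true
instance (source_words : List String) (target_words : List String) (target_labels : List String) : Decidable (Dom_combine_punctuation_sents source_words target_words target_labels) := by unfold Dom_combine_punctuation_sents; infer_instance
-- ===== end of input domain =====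

-- B replaces A's single interleaved loop (running target cursor) by two passes: validate the
-- non-punctuation source words against target_words, then build the labels; equal cost, different decomposition.


-- ===== PORT A =====
-- PUNCTUATION = string.punctuation + "«»"
def pvPUNCTUATION : List Char := "!\"#$%&'()*+,-./:;<=>?@[\\]^_`{|}~«»".toList

def pvNO_PUNCT : String := "NONE"

-- all(x in PUNCTUATION for x in w)
def pvAllPunct (w : String) : Bool := w.toList.all (fun x => pvPUNCTUATION.contains x)

-- the for-loop of A with state (target_index, answer); answer accumulated reversed
def pvALoop (target_words target_labels : List String) : List String → Nat → List String → Option (List String)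
  | [], ti, ans => if ti < target_words.length then none else some ans.reverse
  | w :: rest, ti, ans =>
    if pvAllPunct w then
      pvALoop target_words target_labels rest ti (pvNO_PUNCT :: ans)
    else if target_words.length ≤ ti then none
    else
      match PySem.List.pyGet? target_words (ti : Int) with
      | none => none
      | some tw =>
        if w ≠ tw then none
        else
          match PySem.List.pyGet? target_labels (ti : Int) with
          | none => none  -- IndexError in Python; excluded by Pre_
          | some lbl => pvALoop target_words target_labels rest (ti + 1) (lbl :: ans)

def combine_punctuation_sents (source_words : List String) (target_words : List String) (target_labels : List String) : Option (List String) :=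
  pvALoop target_words target_labels source_words 0 []

-- ===== PORT B =====
-- pass 2 of B: NO_PUNCT for punctuation tokens, target_labels[k] (k incremented) otherwise
def pvBBuild (target_labels : List String) : List String → Nat → List String
  | [], _ => []
  | w :: rest, k =>
    if pvAllPunct w then pvNO_PUNCT :: pvBBuild target_labels rest k
    else ((PySem.List.pyGet? target_labels (k : Int)).getD "") :: pvBBuild target_labels rest (k + 1)

def combine_punctuation_sents_alt (source_words : List String) (target_words : List String) (target_labels : List String) : Option (List String) :=
  let reals := source_words.filter (fun w => !pvAllPunct w)
  if reals.length ≠ target_words.length then none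
  else if (reals.zip target_words).any (fun p => p.1 ≠ p.2) then none
  else some (pvBBuild target_labels source_words 0)

-- ===== PRECONDITION & SPEC =====
-- Pre_ excludes exactly the inputs on which A raises IndexError: target_labels runs out
-- (fewer labels than target words) while the non-punctuation source words still match the
-- target words, so A reaches target_labels[target_index] with target_index out of range.
def Pre_combine_punctuation_sents (source_words : List String) (target_words : List String) (target_labels : List String) : Prop :=
  ¬ (target_labels.length < target_words.length ∧
     (source_words.filter (fun w => !pvAllPunct w)).take (target_labels.length + 1)
       = target_words.take (target_labels.length + 1))

instance (source_words : List String) (target_words : List String) (target_labels : List String) : Decidable (Pre_combine_punctuation_sents source_words target_words target_labels) := by unfold Pre_combine_punctuation_sents; infer_instance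

def pvWitness_combine_punctuation_sents : List String × List String × List String :=
  (["hello", ",", "world", "!"], ["hello", "world"], ["COMMA", "PERIOD"])

def Spec_combine_punctuation_sents (source_words : List String) (target_words : List String) (target_labels : List String) (out : Option (List String)) : Prop := out = combine_punctuation_sents_alt source_words target_words target_labels
instance (source_words : List String) (target_words : List String) (target_labels : List String) (out : Option (List String)) : Decidable (Spec_combine_punctuation_sents source_words target_words target_labels out) := by unfold Spec_combine_punctuation_sents; infer_instance

-- ===== CLAIM (what is proved, stated in full; the proofs are below) =====
def Claim_equal_combine_punctuation_sents : Prop := ∀ (source_words : List String) (target_words : List String) (target_labels : List String), Dom_combine_punctuation_sents source_words target_words target_labels → Pre_combine_punctuation_sents source_words target_words target_labels → Spec_combine_punctuation_sents source_words target_words target_labels (combine_punctuation_sents source_words target_words target_labels)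

-- ===== LEMMAS AND PROOFS =====

-- A's loop returns none whenever the remaining non-punctuation words differ from the
-- remaining target words (no hypothesis on target_labels: the label-lookup-failure
-- branch also returns none)
theorem pvALoop_none (t l : List String) (src : List String) :
    ∀ (ti : Nat) (ans : List String),
    src.filter (fun w => !pvAllPunct w) ≠ t.drop ti →
    pvALoop t l src ti ans = none := by
  induction src with
  | nil =>
    intro ti ans hne
    simp only [List.filter_nil] at hne
    simp only [pvALoop]
    rw [if_pos]
    rcases Nat.lt_or_ge ti t.length with h | h
    · exact h
    · exact absurd (List.drop_eq_nil_of_le h).symm hne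
  | cons w rest ih =>
    intro ti ans hne
    by_cases hp : pvAllPunct w = true
    · simp only [pvALoop, hp, if_true]
      apply ih
      simpa [List.filter_cons, hp] using hne
    · have hfc : (w :: rest).filter (fun w => !pvAllPunct w)
          = w :: rest.filter (fun w => !pvAllPunct w) := by
        simp [List.filter_cons, hp]
      rw [hfc] at hne
      rcases Nat.lt_or_ge ti t.length with hlt | hge
      · have hget : PySem.List.pyGet? t (ti : Int) = some (t[ti]'hlt) :=
          PySem.List.pyGet?_ofNat t ti hlt
        simp only [pvALoop, hget, hp, Nat.not_le.mpr hlt, Bool.false_eq_true, if_false,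
          ite_false]
        rw [List.drop_eq_getElem_cons hlt] at hne
        by_cases hw : w = t[ti]'hlt
        · rw [if_neg (not_not_intro hw)]
          cases hl : PySem.List.pyGet? l (ti : Int) with
          | none => rfl
          | some lbl =>
            show pvALoop t l rest (ti + 1) (lbl :: ans) = none
            apply ih
            intro hc
            exact hne (by rw [hw, hc])
        · rw [if_pos hw]
      · simp only [pvALoop, hp, Bool.false_eq_true, if_false, hge, ite_true]

-- zip-wise equality of equal-length lists is equality
theorem pv_zip_eq_iff {α : Type} [DecidableEq α] (xs ys : List α) (h : xs.length = ys.length) :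
    ((xs.zip ys).any (fun p => p.1 ≠ p.2) = false) ↔ xs = ys := by
  induction xs generalizing ys with
  | nil => cases ys with
    | nil => simp
    | cons y ys => simp at h
  | cons x xs ih =>
    cases ys with
    | nil => simp at h
    | cons y ys =>
      have h' : xs.length = ys.length := by simpa using h
      simp only [List.zip_cons_cons, List.any_cons, Bool.or_eq_false_iff, List.cons.injEq,
        ih ys h', decide_eq_false_iff_not, not_not]

-- characterisation of A's loop, for ti <= |t| <= |l|
theorem pvALoop_eq (t l : List String) (src : List String) :
    ∀ (ti : Nat) (ans : List String), ti ≤ t.length → t.length ≤ l.length →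
    pvALoop t l src ti ans =
      (if src.filter (fun w => !pvAllPunct w) = t.drop ti
       then some (ans.reverse ++ pvBBuild l src ti) else none) := by
  induction src with
  | nil =>
    intro ti ans h1 h2
    simp only [pvALoop, pvBBuild, List.filter_nil, List.append_nil]
    rcases Nat.lt_or_ge ti t.length with h | h
    · rw [if_pos h, if_neg]
      intro hc
      have := congrArg List.length hc
      simp [List.length_drop] at this
      omega
    · rw [if_neg (by omega), if_pos]
      symm
      simpa using List.drop_eq_nil_of_le h
  | cons w rest ih =>
    intro ti ans h1 h2
    by_cases hp : pvAllPunct w = true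
    · simp only [pvALoop, hp, if_pos, pvBBuild, List.filter_cons, Bool.not_eq_eq_eq_not,
        Bool.not_true]
      rw [ih ti (pvNO_PUNCT :: ans) h1 h2]
      simp [hp]
    · have hfc : (w :: rest).filter (fun w => !pvAllPunct w)
          = w :: rest.filter (fun w => !pvAllPunct w) := by
        simp [List.filter_cons, hp]
      rcases Nat.lt_or_ge ti t.length with hlt | hge
      · have hget : PySem.List.pyGet? t (ti : Int) = some (t[ti]'hlt) :=
          PySem.List.pyGet?_ofNat t ti hlt
        have hltl : ti < l.length := by omega
        have hgl : PySem.List.pyGet? l (ti : Int) = some (l[ti]'hltl) :=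
          PySem.List.pyGet?_ofNat l ti hltl
        have hdrop : t.drop ti = t[ti]'hlt :: t.drop (ti + 1) := List.drop_eq_getElem_cons hlt
        simp only [pvALoop, hget, hgl, hp, Nat.not_le.mpr hlt, Bool.false_eq_true, if_false, ite_false]
        by_cases hw : w = t[ti]'hlt
        · rw [if_neg (not_not_intro hw)]
          rw [ih (ti + 1) ((l[ti]'hltl) :: ans) (by omega) h2]
          rw [hfc, hdrop]
          simp only [pvBBuild, hp, Bool.false_eq_true, if_false, hgl, Option.getD_some,
            ite_false]
          by_cases hc : rest.filter (fun w => !pvAllPunct w) = t.drop (ti + 1)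
          · rw [if_pos hc, if_pos (by rw [hw, hc])]
            simp
          · rw [if_neg hc, if_neg (by simp only [List.cons.injEq, not_and]; intro _; exact hc)]
        · rw [if_pos hw, hfc, hdrop]
          have hne : ¬(w :: rest.filter (fun w => !pvAllPunct w)
              = t[ti]'hlt :: t.drop (ti + 1)) := by
            simp only [List.cons.injEq, not_and]
            intro hc; exact absurd hc hw
          rw [if_neg hne]
      · simp only [pvALoop, hp, Bool.false_eq_true, if_false, hge, ite_true, if_true]
        rw [hfc, List.drop_eq_nil_of_le hge]
        simp

-- ===== VERDICT (by name: the statement is the Claim_ definition above) =====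
theorem combine_punctuation_sents_spec : Claim_equal_combine_punctuation_sents := by
  intro src t l _ hpre
  unfold Spec_combine_punctuation_sents combine_punctuation_sents combine_punctuation_sents_alt
  unfold Pre_combine_punctuation_sents at hpre
  by_cases hc : src.filter (fun w => !pvAllPunct w) = t
  · have hlen : t.length ≤ l.length := by
      rcases Nat.lt_or_ge l.length t.length with h | h
      · exact absurd ⟨h, by rw [hc]⟩ hpre
      · exact h
    rw [pvALoop_eq t l src 0 [] (Nat.zero_le _) hlen]
    simp only [List.drop_zero, List.reverse_nil, List.nil_append]
    rw [if_pos hc, if_neg (by simp [hc]), if_neg]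
    rw [Bool.not_eq_true]
    rw [pv_zip_eq_iff _ _ (by rw [hc])]
    exact hc
  · rw [pvALoop_none t l src 0 [] (by simpa using hc)]
    by_cases hl : (src.filter (fun w => !pvAllPunct w)).length = t.length
    · rw [if_neg (by simp [hl]), if_pos]
      cases hA : ((src.filter (fun w => !pvAllPunct w)).zip t).any (fun p => p.1 ≠ p.2) with
      | false => exact absurd ((pv_zip_eq_iff _ _ hl).mp hA) hc
      | true => rfl
    · rw [if_pos (by simpa using hl)]
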